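-- pv_equiv track=rewrite | github.com/hyparik/py_les2 | main.py | group_characters
-- ===== SOURCE A (Python) =====
-- def group_characters(input_string):
--
--     symbols = input_string.split()
--     if not symbols:
--         return []
--
--     result = []
--     current_group = [symbols[0]]
--
--     for i in range(1, len(symbols)):
--         if symbols[i] == current_group[-1]:
--             current_group.append(symbols[i])
--         else:
--             result.append(current_group)
--             current_group = [symbols[i]]
--
--     result.append(current_group)
--     return result
-- ===== SOURCE B (Python) =====
-- def group_characters(input_string):
--     tokens = input_string.split()
--     groups = []
--     i = 0
--     n = len(tokens)
--     while i < n: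
--         j = i
--         while j < n and tokens[j] == tokens[i]:
--             j += 1
--         groups.append(tokens[i:j])
--         i = j
--     return groups
-- ===== Notes on version B (the rewrite author's own statement) =====
-- stated objective: alternative
-- what changed: Replaces A's element-by-element accumulator (current_group/result with a last-element comparison) by a two-pointer scan that finds each maximal run's end index and slices the whole run out at once.
import Mathlib
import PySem

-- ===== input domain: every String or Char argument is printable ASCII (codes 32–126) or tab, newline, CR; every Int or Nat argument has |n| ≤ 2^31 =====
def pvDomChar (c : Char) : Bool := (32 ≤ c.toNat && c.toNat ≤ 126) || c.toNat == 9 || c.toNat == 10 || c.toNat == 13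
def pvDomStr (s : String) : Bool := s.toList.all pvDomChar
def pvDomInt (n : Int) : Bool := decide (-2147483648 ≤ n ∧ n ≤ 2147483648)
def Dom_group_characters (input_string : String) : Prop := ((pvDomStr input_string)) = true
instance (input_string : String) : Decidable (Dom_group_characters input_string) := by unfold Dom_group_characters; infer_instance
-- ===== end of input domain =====

-- B replaces A's element-by-element accumulator by a two-pointer run scan; objective: alternative (same cost).

-- ===== PORT A =====
-- the for-loop over range(1, len(symbols)) with state (result, current_group)
def pvLoopA : List String → List (List String) → List String → List (List String)
  | [], result, current => result ++ [current]
  | x :: xs, result, current =>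
    if x == current.getLast! then pvLoopA xs result (current ++ [x])
    else pvLoopA xs (result ++ [current]) [x]

def group_characters (input_string : String) : List (List String) :=
  match PySem.Str.split₀ input_string with
  | [] => []
  | s0 :: rest => pvLoopA rest [] [s0]

-- ===== PORT B =====
-- outer while: each step takes the maximal run starting at i (inner while = takeWhile) and skips past it
def pvRuns : List String → List (List String)
  | [] => []
  | h :: t => (h :: t.takeWhile (· == h)) :: pvRuns (t.dropWhile (· == h))
  termination_by l => l.length
  decreasing_by simpa using Nat.lt_succ_of_le (t.length_dropWhile_le (· == h))

def group_characters_alt (input_string : String) : List (List String) :=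
  pvRuns (PySem.Str.split₀ input_string)

-- ===== PRECONDITION & SPEC =====
def Spec_group_characters (input_string : String) (out : List (List String)) : Prop := out = group_characters_alt input_string
instance (input_string : String) (out : List (List String)) : Decidable (Spec_group_characters input_string out) := by unfold Spec_group_characters; infer_instance

-- ===== CLAIM (what is proved, stated in full; the proofs are below) =====
def Claim_equal_group_characters : Prop := ∀ (input_string : String), Dom_group_characters input_string → Spec_group_characters input_string (group_characters input_string)

-- ===== LEMMAS AND PROOFS =====
theorem pv_getLast!_cons_cons (a b : String) (l : List String) :
    (a :: b :: l).getLast! = (b :: l).getLast! := by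
  unfold List.getLast!
  simp [List.getLast_cons]

theorem pv_getLast!_replicate (h : String) (k : Nat) :
    (List.replicate (k + 1) h).getLast! = h := by
  induction k with
  | zero => rfl
  | succ k ih =>
    rw [List.replicate_succ, List.replicate_succ, pv_getLast!_cons_cons, ← List.replicate_succ, ih]

theorem pv_takeWhile_replicate (h : String) (k : Nat) (l : List String) :
    (List.replicate k h ++ l).takeWhile (· == h) = List.replicate k h ++ l.takeWhile (· == h) := by
  induction k with
  | zero => simp
  | succ k ih => simp [List.replicate_succ, ih]

theorem pv_dropWhile_replicate (h : String) (k : Nat) (l : List String) :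
    (List.replicate k h ++ l).dropWhile (· == h) = l.dropWhile (· == h) := by
  induction k with
  | zero => simp
  | succ k ih => simp [List.replicate_succ, ih]

theorem pv_runs_replicate (h : String) (k : Nat) (l : List String) :
    pvRuns (List.replicate (k + 1) h ++ l)
      = (List.replicate (k + 1) h ++ l.takeWhile (· == h)) :: pvRuns (l.dropWhile (· == h)) := by
  conv_lhs => rw [List.replicate_succ, List.cons_append, pvRuns]
  rw [pv_takeWhile_replicate, pv_dropWhile_replicate]
  simp [List.replicate_succ]

theorem pv_loopA_eq (xs : List String) : ∀ (res : List (List String)) (k : Nat) (h : String),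
    pvLoopA xs res (List.replicate (k + 1) h) = res ++ pvRuns (List.replicate (k + 1) h ++ xs) := by
  induction xs with
  | nil =>
    intro res k h
    have e := pv_runs_replicate h k []
    simp [pvRuns] at e
    rw [pvLoopA, List.append_nil, e]
  | cons x t ih =>
    intro res k h
    rw [pvLoopA, pv_getLast!_replicate]
    by_cases hx : x = h
    · subst hx
      rw [if_pos (by simp)]
      have e1 : List.replicate (k + 1) x ++ [x] = List.replicate (k + 2) x := by
        simp [List.replicate_succ']
      have e2 : List.replicate (k + 1) x ++ x :: t = List.replicate (k + 2) x ++ t := by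
        simp [List.replicate_succ']
      rw [e1, e2, ih res (k + 1) x]
    · rw [if_neg (by simp [hx])]
      have h1 : [x] = List.replicate (0 + 1) x := rfl
      rw [h1, ih (res ++ [List.replicate (k + 1) h]) 0 x,
        pv_runs_replicate h k (x :: t)]
      have ht : (x :: t).takeWhile (· == h) = [] := by simp [hx]
      have hd : (x :: t).dropWhile (· == h) = x :: t := by simp [hx]
      rw [ht, hd, ← h1]
      simp

-- ===== VERDICT (by name: the statement is the Claim_ definition above) =====
theorem group_characters_spec : Claim_equal_group_characters := by
  intro s _
  unfold Spec_group_characters group_characters group_characters_alt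
  cases hs : PySem.Str.split₀ s with
  | nil => simp [pvRuns]
  | cons h t =>
    have e := pv_loopA_eq t [] 0 h
    simpa using e
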